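-- pv_equiv track=rewrite | github.com/JupitersGhost/EntropicChaos | ChaosMagnet/utils.py | repetition_count_test
-- ===== SOURCE A (Python) =====
-- def repetition_count_test(data, cutoff=10):
--     """
--     Fails if any single value repeats continuously more than 'cutoff' times.
--     Returns: (Passed Bool, Details String)
--     """
--     if not data: return True, "Empty"
--
--     max_repeats = 0
--     current_repeats = 0
--     last_val = None
--
--     for byte in data:
--         if byte == last_val:
--             current_repeats += 1
--         else:
--             max_repeats = max(max_repeats, current_repeats)
--             current_repeats = 1
--             last_val = byte
--
--     max_repeats = max(max_repeats, current_repeats)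
--
--     if max_repeats >= cutoff:
--         return False, f"RCT Fail (Repeats: {max_repeats})"
--     return True, "OK"
-- ===== SOURCE B (Python) =====
-- def repetition_count_test(data, cutoff=10):
--     """
--     Fails if any single value repeats continuously more than 'cutoff' times.
--     Returns: (Passed Bool, Details String)
--     """
--     if not data: return True, "Empty"
--
--     # boundary positions where the value changes, framed by 0 and len(data);
--     # the longest run is the largest gap between consecutive boundaries
--     edges = [0]
--     edges += [i + 1 for i, (a, b) in enumerate(zip(data, data[1:])) if a != b]
--     edges.append(len(data))
--     max_repeats = max(b - a for a, b in zip(edges, edges[1:]))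
--
--     if max_repeats >= cutoff:
--         return False, f"RCT Fail (Repeats: {max_repeats})"
--     return True, "OK"
-- ===== Notes on version B (the rewrite author's own statement) =====
-- stated objective: alternative
-- what changed: Instead of tracking a running (max, current, last) state, B computes the list of boundary positions where the value changes (via enumerate/zip), frames it with 0 and len(data), and takes the maximum gap between consecutive boundaries.
import Mathlib
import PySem

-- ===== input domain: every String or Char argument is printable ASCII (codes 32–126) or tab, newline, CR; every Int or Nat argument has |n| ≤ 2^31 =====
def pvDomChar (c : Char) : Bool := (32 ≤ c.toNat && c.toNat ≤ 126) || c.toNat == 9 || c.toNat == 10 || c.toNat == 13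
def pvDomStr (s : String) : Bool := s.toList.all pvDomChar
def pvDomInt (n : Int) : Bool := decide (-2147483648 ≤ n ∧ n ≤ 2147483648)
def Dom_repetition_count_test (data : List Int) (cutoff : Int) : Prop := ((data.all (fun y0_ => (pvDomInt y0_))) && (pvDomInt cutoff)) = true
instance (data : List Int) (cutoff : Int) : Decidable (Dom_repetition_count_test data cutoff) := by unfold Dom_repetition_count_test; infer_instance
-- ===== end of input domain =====

-- B replaces A's running (max, current, last) loop state with a boundary computation:
-- positions where the value changes, framed by 0 and len(data); the answer is the maximum
-- gap between consecutive boundaries (alternative decomposition; no speed claim).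


-- ===== PORT A =====
-- one loop step of A: state is (max_repeats, current_repeats, last_val)
def pvStepA (s : Int × Int × Option Int) (byte : Int) : Int × Int × Option Int :=
  if some byte = s.2.2 then (s.1, s.2.1 + 1, s.2.2)
  else (max s.1 s.2.1, 1, some byte)

def repetition_count_test (data : List Int) (cutoff : Int) : Bool × String :=
  if data = [] then (true, "Empty")
  else
    let s := data.foldl pvStepA (0, 0, none)
    let max_repeats := max s.1 s.2.1
    if max_repeats ≥ cutoff then
      (false, "RCT Fail (Repeats: " ++ PySem.Int.toStr max_repeats ++ ")")
    else (true, "OK")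

-- ===== PORT B =====
-- edges = [0] + [i+1 for i,(a,b) in enumerate(zip(data, data[1:])) if a != b] + [len(data)]
-- max_repeats = max(b - a for a, b in zip(edges, edges[1:]))
-- (the generator fed to max is provably nonempty — edges has ≥ 2 elements — so Python's
--  max returns; its port max? is some there and .getD 0 is never the default)
def repetition_count_test_alt (data : List Int) (cutoff : Int) : Bool × String :=
  if data = [] then (true, "Empty")
  else
    let edges : List Int :=
      (0 :: ((PySem.List.enumerate (data.zip data.tail) 0).filter
          (fun p => p.2.1 != p.2.2)).map (fun p => p.1 + 1)) ++ [(data.length : Int)]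
    let max_repeats : Int :=
      (PySem.List.max? ((edges.zip edges.tail).map (fun p => p.2 - p.1)) (fun x => x)).getD 0
    if max_repeats ≥ cutoff then
      (false, "RCT Fail (Repeats: " ++ PySem.Int.toStr max_repeats ++ ")")
    else (true, "OK")

-- ===== PRECONDITION & SPEC =====
def Spec_repetition_count_test (data : List Int) (cutoff : Int) (out : Bool × String) : Prop := out = repetition_count_test_alt data cutoff
instance (data : List Int) (cutoff : Int) (out : Bool × String) : Decidable (Spec_repetition_count_test data cutoff out) := by unfold Spec_repetition_count_test; infer_instance

-- ===== CLAIM (what is proved, stated in full; the proofs are below) =====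
def Claim_equal_repetition_count_test : Prop := ∀ (data : List Int) (cutoff : Int), Dom_repetition_count_test data cutoff → Spec_repetition_count_test data cutoff (repetition_count_test data cutoff)

-- ===== LEMMAS AND PROOFS =====

-- reference recursion mirroring A's loop, over Nat counters
def pvNatGo : List Int → Int → Nat → Nat → Nat
  | [], _, c, b => Nat.max b c
  | y :: ys, x, c, b => if y = x then pvNatGo ys x (c + 1) b else pvNatGo ys y 1 (Nat.max b c)

-- run-length decomposition: length of the leading run's tail, and the remainder
def pvCountRun (x : Int) : List Int → Nat × List Int
  | [] => (0, [])
  | y :: ys => if y = x then ((pvCountRun x ys).1 + 1, (pvCountRun x ys).2) else (0, y :: ys)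

theorem pvCountRun_len (x : Int) (xs : List Int) : (pvCountRun x xs).2.length ≤ xs.length := by
  induction xs with
  | nil => simp [pvCountRun]
  | cons y ys ih =>
    by_cases h : y = x
    · simp [pvCountRun, h]; omega
    · simp [pvCountRun, h]

def pvRuns : List Int → List Nat
  | [] => []
  | x :: xs => ((pvCountRun x xs).1 + 1) :: pvRuns (pvCountRun x xs).2
termination_by l => l.length
decreasing_by
  have := pvCountRun_len x xs
  simp
  omega

-- change positions of a list, at offset o
def pvCs : List Int → Int → List Int
  | x :: y :: t, o => if x = y then pvCs (y :: t) (o + 1) else (o + 1) :: pvCs (y :: t) (o + 1)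
  | _, _ => []

-- successive differences
def pvDiffs (L : List Int) : List Int := (L.zip L.tail).map (fun p => p.2 - p.1)

theorem pv_zero_max (n : Nat) : Nat.max 0 n = n := Nat.zero_max n

theorem pv_foldA (xs : List Int) : ∀ (x : Int) (c b : Nat),
    max (xs.foldl pvStepA ((b : Int), (c : Int), some x)).1
        (xs.foldl pvStepA ((b : Int), (c : Int), some x)).2.1
      = ((pvNatGo xs x c b : Nat) : Int) := by
  induction xs with
  | nil =>
    intro x c b
    simp [pvNatGo, Nat.cast_max]
  | cons y ys ih =>
    intro x c b
    simp only [List.foldl_cons, pvStepA, pvNatGo]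
    by_cases h : y = x
    · rw [if_pos (by simp [h]), if_pos h]
      have e : ((c : Int) + 1) = ((c + 1 : Nat) : Int) := by push_cast; ring
      rw [show ((b : Int), (c : Int) + 1, some x) = ((b : Int), ((c + 1 : Nat) : Int), some x) by rw [e]]
      exact ih x (c + 1) b
    · rw [if_neg (by simp [h]), if_neg h]
      have e : (max (b : Int) (c : Int), (1 : Int), some y)
          = (((Nat.max b c : Nat) : Int), ((1 : Nat) : Int), some y) := by
        simp [Nat.cast_max]
      rw [e]
      exact ih y 1 (Nat.max b c)

theorem pv_max_assoc (a b c : Nat) : Nat.max (Nat.max a b) c = Nat.max a (Nat.max b c) :=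
  Nat.max_assoc a b c

theorem pv_foldl_max_init (L : List Nat) : ∀ (a b : Nat),
    L.foldl Nat.max (Nat.max a b) = Nat.max a (L.foldl Nat.max b) := by
  induction L with
  | nil => intro a b; rfl
  | cons n ns ih =>
    intro a b
    simp only [List.foldl_cons]
    rw [pv_max_assoc, ih]

theorem pv_natGo_eq (xs : List Int) : ∀ (x : Int) (c b : Nat),
    pvNatGo xs x c b
      = Nat.max b ((pvRuns (pvCountRun x xs).2).foldl Nat.max (c + (pvCountRun x xs).1)) := by
  induction xs with
  | nil =>
    intro x c b
    simp [pvNatGo, pvCountRun, pvRuns]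
  | cons y ys ih =>
    intro x c b
    by_cases h : y = x
    · have harith : c + ((pvCountRun x ys).1 + 1) = c + 1 + (pvCountRun x ys).1 := by omega
      simp only [pvNatGo, pvCountRun, if_pos h, harith]
      exact ih x (c + 1) b
    · simp only [pvNatGo, pvCountRun, if_neg h, Nat.add_zero]
      rw [ih y 1 (Nat.max b c), pvRuns]
      simp only [List.foldl_cons]
      rw [Nat.add_comm (pvCountRun y ys).1 1]
      rw [pv_foldl_max_init (pvRuns (pvCountRun y ys).2) c (1 + (pvCountRun y ys).1)]
      exact pv_max_assoc b c _

-- the port's enumerate/zip/filter/map pipeline computes pvCs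
theorem pv_pipeline_eq (l : List Int) : ∀ (o : Int),
    ((PySem.List.enumerate (l.zip l.tail) o).filter
        (fun p => p.2.1 != p.2.2)).map (fun p => p.1 + 1) = pvCs l o := by
  induction l with
  | nil => intro o; simp [pvCs, PySem.List.enumerate_nil]
  | cons x xs ih =>
    intro o
    cases xs with
    | nil => simp [pvCs, PySem.List.enumerate_nil]
    | cons y t =>
      have H := ih (o + 1)
      simp only [List.tail_cons] at H
      simp only [List.tail_cons, List.zip_cons_cons, PySem.List.enumerate_cons]
      by_cases h : x = y
      · simp only [pvCs, if_pos h, List.filter_cons]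
        rw [if_neg (by simp [h])]
        exact H
      · simp only [pvCs, if_neg h, List.filter_cons]
        rw [if_pos (by simp [h])]
        simp only [List.map_cons]
        rw [H]

-- helper facts about pvCountRun on a cons with equal / unequal head
theorem pvCountRun_cons_eq (x : Int) (t : List Int) :
    pvCountRun x (x :: t) = ((pvCountRun x t).1 + 1, (pvCountRun x t).2) := by
  simp [pvCountRun]

theorem pvCountRun_cons_ne (x y : Int) (t : List Int) (h : y ≠ x) :
    pvCountRun x (y :: t) = (0, y :: t) := by
  simp [pvCountRun, h]

-- the framed change positions differ to exactly the run lengths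
theorem pv_diffs_runs (l : List Int) : ∀ (o : Int), l ≠ [] →
    pvDiffs ((o :: pvCs l o) ++ [o + (l.length : Int)])
      = (pvRuns l).map (fun n : Nat => (n : Int)) := by
  induction l with
  | nil => intro o h; exact absurd rfl h
  | cons x xs ih =>
    intro o _
    cases xs with
    | nil =>
      simp [pvCs, pvDiffs, pvRuns, pvCountRun]
    | cons y t =>
      have hlen : o + ((x :: y :: t).length : Int) = (o + 1) + ((y :: t).length : Int) := by
        simp; ring
      by_cases h : x = y
      · -- head extends the first run: same tail, first gap one larger
        subst h
        have hIH := ih (o + 1) (by simp)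
        rw [hlen]
        simp only [pvCs, reduceIte]
        have hne : pvCs (x :: t) (o + 1) ++ [(o + 1) + ((x :: t).length : Int)] ≠ [] := by
          simp
        obtain ⟨m, M', hM⟩ := List.exists_cons_of_ne_nil hne
        rw [List.cons_append, hM]
        rw [List.cons_append, hM] at hIH
        have hruns : pvRuns (x :: x :: t)
            = ((pvCountRun x t).1 + 2) :: pvRuns (pvCountRun x t).2 := by
          rw [pvRuns, pvCountRun_cons_eq]
        have hruns2 : pvRuns (x :: t)
            = ((pvCountRun x t).1 + 1) :: pvRuns (pvCountRun x t).2 := by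
          rw [pvRuns]
        rw [hruns2] at hIH
        rw [hruns]
        simp only [pvDiffs, List.tail_cons, List.zip_cons_cons, List.map_cons] at hIH ⊢
        obtain ⟨h1, h2⟩ := List.cons_eq_cons.mp hIH
        rw [List.cons_eq_cons]
        refine ⟨by push_cast at h1 ⊢; omega, h2⟩
      · -- head starts its own run of length 1
        have hIH := ih (o + 1) (by simp)
        rw [hlen]
        simp only [pvCs, if_neg h]
        rw [pvRuns, pvCountRun_cons_ne x y t (fun e => h e.symm)]
        simp only [List.map_cons]
        simp only [pvDiffs, List.cons_append, List.tail_cons, List.zip_cons_cons,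
          List.map_cons] at hIH ⊢
        rw [List.cons_eq_cons]
        refine ⟨by push_cast; omega, hIH⟩

-- folding Int max over casts equals casting the Nat fold
theorem pv_fold_cast (R : List Nat) : ∀ (a : Nat),
    (R.map (fun n : Nat => (n : Int))).foldl max ((a : Nat) : Int)
      = ((R.foldl Nat.max a : Nat) : Int) := by
  induction R with
  | nil => intro a; rfl
  | cons n ns ih =>
    intro a
    simp only [List.map_cons, List.foldl_cons]
    rw [show max ((a : Nat) : Int) ((n : Nat) : Int) = ((Nat.max a n : Nat) : Int) by
      simp [Nat.cast_max]]
    exact ih (Nat.max a n)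

theorem pv_main (data : List Int) (cutoff : Int) :
    repetition_count_test data cutoff = repetition_count_test_alt data cutoff := by
  cases data with
  | nil => rfl
  | cons x xs =>
    simp only [repetition_count_test, repetition_count_test_alt, List.foldl_cons, pvStepA,
      reduceCtorEq, reduceIte]
    -- A's side: max over pvRuns
    have h0 : (max (0 : Int) 0, (1 : Int), some x)
        = (((0 : Nat) : Int), ((1 : Nat) : Int), some x) := by norm_num
    rw [h0, pv_foldA xs x 1 0]
    have hA : pvNatGo xs x 1 0 = (pvRuns (x :: xs)).foldl Nat.max 0 := by
      rw [pv_natGo_eq xs x 1 0, pvRuns]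
      simp only [List.foldl_cons]
      rw [pv_zero_max, pv_zero_max, Nat.add_comm (pvCountRun x xs).1 1]
    rw [hA]
    -- B's side: diffs of the framed change positions, then max
    rw [pv_pipeline_eq (x :: xs) 0]
    have hd := pv_diffs_runs (x :: xs) 0 (by simp)
    simp only [zero_add] at hd
    unfold pvDiffs at hd
    rw [hd]
    have hruns : pvRuns (x :: xs) = ((pvCountRun x xs).1 + 1) :: pvRuns (pvCountRun x xs).2 := by
      rw [pvRuns]
    rw [hruns]
    simp only [List.map_cons]
    rw [PySem.List.max?_id_cons]
    simp only [Option.getD_some]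
    rw [pv_fold_cast]
    simp only [List.foldl_cons, pv_zero_max]

-- ===== VERDICT (by name: the statement is the Claim_ definition above) =====
theorem repetition_count_test_spec : Claim_equal_repetition_count_test := by
  intro data cutoff _
  unfold Spec_repetition_count_test
  exact pv_main data cutoff
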